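-- pv_equiv track=rewrite | github.com/g-walley/Advent-of-code | 2022/day03/solution.py | pt2
-- ===== SOURCE A (Python) =====
-- letter_prio = {
--     'a': 1, 'b': 2, 'c': 3, 'd': 4, 'e': 5, 'f': 6,
--     'g': 7, 'h': 8, 'i': 9, 'j': 10,'k': 11,'l': 12,
--     'm': 13,'n': 14,'o': 15,'p': 16,'q': 17,'r': 18,
--     's': 19,'t': 20,'u': 21,'v': 22,'w': 23,'x': 24,
--     'y': 25,'z': 26,'A': 27,'B': 28,'C': 29,'D': 30,
--     'E': 31,'F': 32,'G': 33,'H': 34,'I': 35,'J': 36,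
--     'K': 37,'L': 38,'M': 39,'N': 40,'O': 41,'P': 42,
--     'Q': 43,'R': 44,'S': 45,'T': 46,'U': 47,'V': 48,
--     'W': 49,'X': 50,'Y': 51,'Z': 52,
-- }
--
-- def pt2(raw_input: str):
--     """comparing 3 strings. Find common char in all"""
--     backpacks = raw_input.splitlines()
--     groups = int(len(backpacks)/3)
--     priorities = []
--     for group_number in range(groups):
--         group = [
--             set(backpack)
--             for backpack in backpacks[3*group_number: (3*group_number) + 3]
--         ]
--
--         badge = group[0].intersection(group[1]).intersection(group[2])
--         assert len(badge) == 1
--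
--         priorities.append(letter_prio[badge.pop()])
--
--     return sum(priorities)
-- ===== SOURCE B (Python) =====
-- def pt2(raw_input: str):
--     """Chunk lines in threes off one iterator; tally each line's distinct chars,
--     the badge is the char counted 3 times; priority by ord() arithmetic."""
--     lines = iter(raw_input.splitlines())
--     total = 0
--     for x, y, z in zip(lines, lines, lines):
--         counts = {}
--         for line in (x, y, z):
--             for ch in dict.fromkeys(line):  # distinct chars, first-seen order
--                 counts[ch] = counts.get(ch, 0) + 1
--         [badge] = [c for c, n in counts.items() if n == 3]
--         total += ord(badge) - 96 if badge.islower() else ord(badge) - 38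
--     return total
-- ===== Notes on version B (the rewrite author's own statement) =====
-- stated objective: alternative
-- what changed: A indexes groups by range(len/3) and slices, chains two set intersections per group and sums a list of dict-looked-up priorities; B consumes the lines three at a time off a single iterator, tallies the deduplicated characters in a counter dict, picks the character counted 3 times, and computes its priority by ord() arithmetic instead of the 52-entry dict, keeping a running total.
import Mathlib
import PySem

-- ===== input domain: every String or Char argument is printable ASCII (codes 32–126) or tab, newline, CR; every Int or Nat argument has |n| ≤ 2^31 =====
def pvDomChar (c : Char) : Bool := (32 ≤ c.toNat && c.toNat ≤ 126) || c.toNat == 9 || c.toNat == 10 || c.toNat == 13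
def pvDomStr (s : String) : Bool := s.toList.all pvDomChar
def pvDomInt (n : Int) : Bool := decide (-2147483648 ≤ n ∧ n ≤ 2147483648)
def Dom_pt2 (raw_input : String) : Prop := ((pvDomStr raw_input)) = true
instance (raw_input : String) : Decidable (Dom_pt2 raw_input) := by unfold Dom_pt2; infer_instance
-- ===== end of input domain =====

-- B consumes the lines three at a time off one iterator, tallies deduplicated chars in a counter
-- dict (badge = the char counted 3 times) and computes the priority arithmetically — objective: alternative.

-- ===== PORT A =====
-- the module constant letter_prio (used by Source A only)
def letterPrio : PySem.Dict Char Int := PySem.Dict.ofList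
  [('a', 1), ('b', 2), ('c', 3), ('d', 4), ('e', 5), ('f', 6),
   ('g', 7), ('h', 8), ('i', 9), ('j', 10), ('k', 11), ('l', 12),
   ('m', 13), ('n', 14), ('o', 15), ('p', 16), ('q', 17), ('r', 18),
   ('s', 19), ('t', 20), ('u', 21), ('v', 22), ('w', 23), ('x', 24),
   ('y', 25), ('z', 26), ('A', 27), ('B', 28), ('C', 29), ('D', 30),
   ('E', 31), ('F', 32), ('G', 33), ('H', 34), ('I', 35), ('J', 36),
   ('K', 37), ('L', 38), ('M', 39), ('N', 40), ('O', 41), ('P', 42),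
   ('Q', 43), ('R', 44), ('S', 45), ('T', 46), ('U', 47), ('V', 48),
   ('W', 49), ('X', 50), ('Y', 51), ('Z', 52)]

def pt2 (raw_input : String) : Int :=
  let backpacks := PySem.Str.splitlines raw_input
  -- int(len(backpacks)/3): len ≥ 0, so true division + int() truncation = floor division (exact on Dom)
  let groups : Int := PySem.Int.floordiv (backpacks.length : Int) 3
  let priorities : List Int :=
    (PySem.List.pyRange 0 groups 1).foldl (fun priorities group_number =>
      let group := (PySem.List.slice backpacks (some (3 * group_number)) (some (3 * group_number + 3))).map
        (fun backpack => PySem.Set.ofList backpack.toList)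
      -- group[0], group[1], group[2]: in range(groups) the slice always has 3 elements, so getD is exact
      let badge := PySem.Set.inter (PySem.Set.inter (group.getD 0 PySem.Set.empty) (group.getD 1 PySem.Set.empty))
        (group.getD 2 PySem.Set.empty)
      -- assert len(badge)==1 raises outside Pre_; badge.pop() on the singleton is its only element (getD 0);
      -- letter_prio[…] raises KeyError outside Pre_, so getD … 0 is exact under Pre_
      priorities ++ [letterPrio.getD (badge.getD 0 ' ') 0]) []
  priorities.sum

-- ===== PORT B =====
-- the body of B's for-loop: counter over the three deduped lines, badge = count 3, ord arithmetic
def badgePrio (x y z : String) : Int :=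
  let counts : PySem.Dict Char Int :=
    [x, y, z].foldl (fun counts line =>
      (PySem.List.dedup line.toList).foldl (fun counts c => counts.insert c (counts.getD c 0 + 1)) counts)
      PySem.Dict.empty
  -- [badge] = … raises ValueError outside Pre_, so getD 0 is exact under Pre_
  let badge := ((counts.items.filter (fun p => p.2 == (3 : Int))).map (fun p => p.1)).getD 0 ' '
  if 'a' ≤ badge && badge ≤ 'z' then (badge.toNat : Int) - 96 else (badge.toNat : Int) - 38

-- the zip(it, it, it) loop: consume three lines per step, accumulating the total
def chunk3Sum (total : Int) : List String → Int
  | x :: y :: z :: rest => chunk3Sum (total + badgePrio x y z) rest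
  | _ => total

def pt2_alt (raw_input : String) : Int :=
  chunk3Sum 0 (PySem.Str.splitlines raw_input)

-- ===== PRECONDITION & SPEC =====
def isBadgeLetter (c : Char) : Bool := ('a' ≤ c && c ≤ 'z') || ('A' ≤ c && c ≤ 'Z')

-- a group of three lines is OK iff exactly one char occurs in all three and it is a letter a-zA-Z
def groupOk (l0 l1 l2 : List Char) : Bool :=
  match (PySem.List.dedup l0).filter (fun c => l1.contains c && l2.contains c) with
  | [c] => isBadgeLetter c
  | _ => false

-- Pre_ excludes exactly the inputs where the Python raises: a group of three lines whose common
-- characters are not exactly one letter of a-zA-Z (AssertionError, or KeyError in letter_prio)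
def Pre_pt2 (raw_input : String) : Prop :=
  ∀ g : Nat, g < (PySem.Str.splitlines raw_input).length / 3 →
    groupOk ((PySem.Str.splitlines raw_input).getD (3 * g) "").toList
            ((PySem.Str.splitlines raw_input).getD (3 * g + 1) "").toList
            ((PySem.Str.splitlines raw_input).getD (3 * g + 2) "").toList = true

instance (raw_input : String) : Decidable (Pre_pt2 raw_input) := by unfold Pre_pt2; infer_instance

def pvWitness_pt2 : String := "ab\nbc\nbd"

def Spec_pt2 (raw_input : String) (out : Int) : Prop := out = pt2_alt raw_input
instance (raw_input : String) (out : Int) : Decidable (Spec_pt2 raw_input out) := by unfold Spec_pt2; infer_instance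

-- ===== CLAIM (what is proved, stated in full; the proofs are below) =====
def Claim_equal_pt2 : Prop := ∀ (raw_input : String), Dom_pt2 raw_input → Pre_pt2 raw_input → Spec_pt2 raw_input (pt2 raw_input)

-- ===== LEMMAS AND PROOFS =====

-- A's per-group value, expressed over getD-indexed lines
def aVal (bs : List String) (g : Nat) : Int :=
  letterPrio.getD
    ((PySem.Set.inter (PySem.Set.inter (PySem.Set.ofList (bs.getD (3 * g) "").toList)
        (PySem.Set.ofList (bs.getD (3 * g + 1) "").toList))
      (PySem.Set.ofList (bs.getD (3 * g + 2) "").toList)).getD 0 ' ') 0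

-- the first three elements of a drop, as getD values
theorem take_three_drop (xs : List String) (k : Nat) (h : k + 3 ≤ xs.length) :
    (xs.drop k).take 3 = [xs.getD k "", xs.getD (k + 1) "", xs.getD (k + 2) ""] := by
  have hl3 : 3 ≤ (xs.drop k).length := by rw [List.length_drop]; omega
  have hg : ∀ i : Nat, xs.getD (k + i) "" = ((xs.drop k)[i]?).getD "" := by
    intro i
    rw [List.getD_eq_getElem?_getD, List.getElem?_drop]
  match e : xs.drop k with
  | [] => rw [e] at hl3; simp at hl3
  | [a] => rw [e] at hl3; simp at hl3
  | [a, b] => rw [e] at hl3; simp at hl3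
  | a :: b :: c :: rest =>
    have e0 := hg 0; have e1 := hg 1; have e2 := hg 2
    rw [e] at e0 e1 e2
    simp only [Nat.add_zero, List.getElem?_cons_zero, List.getElem?_cons_succ,
      Option.getD_some] at e0 e1 e2
    simp only [List.take_succ_cons, List.take_zero]
    rw [e0, e1, e2]

-- A's loop body at an in-range index IS aVal
theorem aBody_eq_aVal (backpacks : List String) (g : Nat) (h3 : 3 * g + 3 ≤ backpacks.length) :
    (letterPrio.getD
      ((PySem.Set.inter (PySem.Set.inter
          (((PySem.List.slice backpacks (some (3 * (g : Int))) (some (3 * (g : Int) + 3))).map (fun backpack => PySem.Set.ofList backpack.toList)).getD 0 PySem.Set.empty)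
          (((PySem.List.slice backpacks (some (3 * (g : Int))) (some (3 * (g : Int) + 3))).map (fun backpack => PySem.Set.ofList backpack.toList)).getD 1 PySem.Set.empty))
          (((PySem.List.slice backpacks (some (3 * (g : Int))) (some (3 * (g : Int) + 3))).map (fun backpack => PySem.Set.ofList backpack.toList)).getD 2 PySem.Set.empty)).getD 0 ' ') 0)
    = aVal backpacks g := by
  have hg : (3 * (g : Int)) = ((3 * g : Nat) : Int) := by push_cast; ring
  have h33 : (3 * (g : Int) + 3) = ((3 * g : Nat) : Int) + ((3 : Nat) : Int) := by push_cast; ring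
  have hslice : PySem.List.slice backpacks (some (3 * (g : Int))) (some (3 * (g : Int) + 3)) =
      [backpacks.getD (3 * g) "", backpacks.getD (3 * g + 1) "", backpacks.getD (3 * g + 2) ""] := by
    rw [h33, hg, PySem.List.slice_natCast_add backpacks (3 * g) 3]
    exact take_three_drop backpacks (3 * g) (by omega)
  rw [hslice]
  simp only [List.map_cons, List.map_nil, List.getD_cons_zero, List.getD_cons_succ]
  rfl

-- a singleton-append counting loop over three deduped lists IS the Counter of their concatenation,
-- and its count-3 keys are exactly A's chained intersection
theorem badge_lists_eq (b0 b1 b2 : List Char) :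
    ((PySem.Dict.counter (PySem.List.dedup b0 ++ (PySem.List.dedup b1 ++ PySem.List.dedup b2))).items.filter
        (fun p => p.2 == (3 : Int))).map (fun p => p.1)
      = PySem.Set.inter (PySem.Set.inter (PySem.Set.ofList b0) (PySem.Set.ofList b1)) (PySem.Set.ofList b2) := by
  rw [PySem.Dict.items_counter, List.filter_map, List.map_map]
  have hid : ((fun p : Char × Int => p.1) ∘ fun k => (k, (List.count k (PySem.List.dedup b0 ++ (PySem.List.dedup b1 ++ PySem.List.dedup b2)) : Int))) = id := rfl
  rw [hid, List.map_id]
  set d0 := PySem.List.dedup b0 with hd0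
  set d1 := PySem.List.dedup b1 with hd1
  set d2 := PySem.List.dedup b2 with hd2
  have hn0 : d0.Nodup := PySem.Set.nodup_ofList b0
  have hn1 : d1.Nodup := PySem.Set.nodup_ofList b1
  have hn2 : d2.Nodup := PySem.Set.nodup_ofList b2
  have hcount : ∀ (d : List Char) (k : Char), d.Nodup → List.count k d = if k ∈ d then 1 else 0 := by
    intro d k hn
    by_cases hm : k ∈ d
    · simp only [hm, if_true]
      have h1 : List.count k d ≤ 1 := List.nodup_iff_count_le_one.mp hn k
      have h2 : 0 < List.count k d := List.count_pos_iff.mpr hm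
      omega
    · rw [if_neg hm, List.count_eq_zero_of_not_mem hm]
  have hS : PySem.Set.ofList (d0 ++ (d1 ++ d2)) = d0 ++ ((PySem.Set.ofList (d1 ++ d2)).filter (fun y => !(PySem.Set.contains d0 y))) := by
    rw [PySem.Set.ofList_append, PySem.Set.ofList_eq_self_of_nodup d0 hn0,
      PySem.Set.update_eq_append_filter]
  rw [hS, List.filter_append]
  have hextra : ((PySem.Set.ofList (d1 ++ d2)).filter (fun y => !(PySem.Set.contains d0 y))).filter
      (fun k => ((List.count k (d0 ++ (d1 ++ d2)) : Int) == (3 : Int))) = [] := by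
    rw [List.filter_eq_nil_iff]
    intro k hk
    have hk0 : k ∉ d0 := by
      have := (List.mem_filter.mp hk).2
      simpa [PySem.Set.contains_iff] using this
    have c0 : List.count k d0 = 0 := List.count_eq_zero_of_not_mem hk0
    have c1 : List.count k d1 ≤ 1 := List.nodup_iff_count_le_one.mp hn1 k
    have c2 : List.count k d2 ≤ 1 := List.nodup_iff_count_le_one.mp hn2 k
    have : List.count k (d0 ++ (d1 ++ d2)) ≤ 2 := by
      rw [List.count_append, List.count_append]; omega
    simp only [beq_iff_eq]
    intro hc
    have : (3 : Int) ≤ 2 := by rw [← hc]; exact_mod_cast this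
    omega
  simp only [Function.comp_def]
  rw [hextra, List.append_nil]
  show d0.filter _ = PySem.Set.inter (PySem.Set.inter d0 d1) d2
  unfold PySem.Set.inter
  rw [List.filter_filter]
  apply List.filter_congr
  intro k hk
  have e0 : List.count k d0 = 1 := by rw [hcount d0 k hn0, if_pos hk]
  rw [List.count_append, List.count_append, e0, hcount d1 k hn1, hcount d2 k hn2]
  by_cases h1 : k ∈ d1 <;> by_cases h2 : k ∈ d2 <;>
    simp [h1, h2]

-- A's chained intersection is the filtered-dedup list groupOk matches on
theorem inter_eq_filter (l0 l1 l2 : List Char) :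
    PySem.Set.inter (PySem.Set.inter (PySem.Set.ofList l0) (PySem.Set.ofList l1)) (PySem.Set.ofList l2)
      = (PySem.List.dedup l0).filter (fun c => l1.contains c && l2.contains c) := by
  unfold PySem.Set.inter
  rw [List.filter_filter]
  simp only [PySem.List.dedup_eq_ofList]
  apply List.filter_congr
  intro c hc
  simp [PySem.Set.mem_ofList, Bool.and_comm]

-- the 52-entry dict agrees with ord arithmetic on every letter
theorem letterPrio_arith (c : Char) (h : isBadgeLetter c = true) :
    letterPrio.getD c 0 = if 'a' ≤ c && c ≤ 'z' then (c.toNat : Int) - 96 else (c.toNat : Int) - 38 := by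
  have hb : (97 ≤ c.toNat ∧ c.toNat ≤ 122) ∨ (65 ≤ c.toNat ∧ c.toNat ≤ 90) := by
    simp only [isBadgeLetter, Bool.or_eq_true, Bool.and_eq_true, decide_eq_true_eq,
      Char.le_def, UInt32.le_iff_toNat_le] at h
    rcases h with ⟨h1, h2⟩ | ⟨h1, h2⟩ <;> [left; right] <;> exact ⟨h1, h2⟩
  have key : ∀ n ∈ List.range' 97 26 ++ List.range' 65 26,
      letterPrio.getD (Char.ofNat n) 0 =
        if 'a' ≤ Char.ofNat n && Char.ofNat n ≤ 'z' then ((Char.ofNat n).toNat : Int) - 96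
        else ((Char.ofNat n).toNat : Int) - 38 := by
    set_option maxRecDepth 20000 in decide
  have hmem : c.toNat ∈ List.range' 97 26 ++ List.range' 65 26 := by
    rw [List.mem_append, List.mem_range'_1, List.mem_range'_1]
    omega
  have := key c.toNat hmem
  rwa [Char.ofNat_toNat] at this

-- on a good group, A's dict-lookup value equals B's counter/ord value
theorem prio_eq (x y z : String) (h : groupOk x.toList y.toList z.toList = true) :
    letterPrio.getD
        ((PySem.Set.inter (PySem.Set.inter (PySem.Set.ofList x.toList) (PySem.Set.ofList y.toList))
          (PySem.Set.ofList z.toList)).getD 0 ' ') 0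
      = badgePrio x y z := by
  have hcounts : ([x, y, z].foldl (fun counts line =>
      (PySem.List.dedup line.toList).foldl (fun counts c => counts.insert c (counts.getD c 0 + 1)) counts)
      PySem.Dict.empty)
      = PySem.Dict.counter (PySem.List.dedup x.toList ++ (PySem.List.dedup y.toList ++ PySem.List.dedup z.toList)) := by
    simp only [List.foldl_cons, List.foldl_nil]
    rw [← List.foldl_append, ← List.foldl_append, PySem.Dict.foldl_insert_getD_add_one_eq_counter]
  simp only [badgePrio, hcounts, badge_lists_eq, inter_eq_filter]
  unfold groupOk at h
  cases e : (PySem.List.dedup x.toList).filter (fun c => y.toList.contains c && z.toList.contains c) with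
  | nil => rw [e] at h; simp at h
  | cons c tl =>
    cases tl with
    | nil =>
      rw [e] at h
      simp only at h
      simp only [List.getD_cons_zero]
      exact letterPrio_arith c h
    | cons d tl' => rw [e] at h; simp at h

-- accumulator lemma for B's loop
theorem chunk3Sum_acc (t : Int) (l : List String) : chunk3Sum t l = t + chunk3Sum 0 l := by
  match l with
  | x :: y :: z :: rest =>
    rw [show chunk3Sum t (x::y::z::rest) = chunk3Sum (t + badgePrio x y z) rest from rfl,
        show chunk3Sum 0 (x::y::z::rest) = chunk3Sum (0 + badgePrio x y z) rest from rfl,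
        chunk3Sum_acc (t + badgePrio x y z) rest, chunk3Sum_acc (0 + badgePrio x y z) rest]
    ring
  | [] => simp [chunk3Sum]
  | [a] => simp [chunk3Sum]
  | [a, b] => simp [chunk3Sum]
termination_by l.length

-- shifting three lines off the front shifts every getD index by 3
theorem getD_shift3 (x y z : String) (rest : List String) (m : Nat) :
    (x :: y :: z :: rest).getD (m + 3) "" = rest.getD m "" := by
  have h : m + 3 = ((m + 1) + 1) + 1 := by ring
  rw [h, List.getD_cons_succ, List.getD_cons_succ, List.getD_cons_succ]

theorem aVal_shift (x y z : String) (rest : List String) (g : Nat) :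
    aVal (x :: y :: z :: rest) (g + 1) = aVal rest g := by
  unfold aVal
  rw [show 3 * (g + 1) + 2 = (3 * g + 2) + 3 from by ring, getD_shift3,
      show 3 * (g + 1) + 1 = (3 * g + 1) + 3 from by ring, getD_shift3,
      show 3 * (g + 1) = 3 * g + 3 from by ring, getD_shift3]

-- the heart: A's indexed per-group sum equals B's 3-chunk recursion, under Pre_'s per-group condition
set_option maxRecDepth 8000 in
theorem sum_aVal_eq_chunk3Sum (bs : List String)
    (h : ∀ g : Nat, g < bs.length / 3 →
      groupOk (bs.getD (3 * g) "").toList (bs.getD (3 * g + 1) "").toList (bs.getD (3 * g + 2) "").toList = true) :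
    ((List.range (bs.length / 3)).map (fun g => aVal bs g)).sum = chunk3Sum 0 bs := by
  match bs with
  | x :: y :: z :: rest =>
    have hlen : (x :: y :: z :: rest).length / 3 = rest.length / 3 + 1 := by
      simp only [List.length_cons]; omega
    have h0 := h 0 (by omega)
    simp only [Nat.mul_zero, List.getD_cons_zero, List.getD_cons_succ] at h0
    have hv0 : aVal (x :: y :: z :: rest) 0 = badgePrio x y z := by
      unfold aVal
      simp only [Nat.mul_zero, List.getD_cons_zero, List.getD_cons_succ]
      exact prio_eq x y z h0
    have hrest : ∀ g : Nat, g < rest.length / 3 →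
        groupOk (rest.getD (3 * g) "").toList (rest.getD (3 * g + 1) "").toList
          (rest.getD (3 * g + 2) "").toList = true := by
      intro g hg
      have := h (g + 1) (by omega)
      rwa [show 3 * (g + 1) + 2 = (3 * g + 2) + 3 from by ring, getD_shift3,
           show 3 * (g + 1) + 1 = (3 * g + 1) + 3 from by ring, getD_shift3,
           show 3 * (g + 1) = 3 * g + 3 from by ring, getD_shift3] at this
    have ih := sum_aVal_eq_chunk3Sum rest hrest
    rw [hlen, List.range_succ_eq_map, List.map_cons, List.map_map, List.sum_cons]
    have hcomp : ((fun g => aVal (x :: y :: z :: rest) g) ∘ Nat.succ) = fun g => aVal rest g :=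
      funext (fun g => aVal_shift x y z rest g)
    rw [hcomp, hv0, ih,
        show chunk3Sum 0 (x :: y :: z :: rest) = chunk3Sum (0 + badgePrio x y z) rest from rfl,
        chunk3Sum_acc (0 + badgePrio x y z) rest]
    ring
  | [] => simp [chunk3Sum]
  | [a] => simp [chunk3Sum]
  | [a, b] => simp [chunk3Sum]
termination_by bs.length

theorem pt2_eq_alt (raw_input : String) (hpre : Pre_pt2 raw_input) : pt2 raw_input = pt2_alt raw_input := by
  simp only [pt2, pt2_alt]
  rw [PySem.List.foldl_append_singleton_eq_map, List.nil_append]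
  have hfd : PySem.Int.floordiv ((PySem.Str.splitlines raw_input).length : Int) 3
      = (((PySem.Str.splitlines raw_input).length / 3 : Nat) : Int) := by
    exact_mod_cast PySem.Int.floordiv_natCast (PySem.Str.splitlines raw_input).length 3
  rw [hfd, PySem.List.pyRange_one, List.map_map]
  have hsub : ((((PySem.Str.splitlines raw_input).length / 3 : Nat) : Int) - 0).toNat
      = (PySem.Str.splitlines raw_input).length / 3 := by omega
  rw [hsub, ← sum_aVal_eq_chunk3Sum (PySem.Str.splitlines raw_input) hpre]
  apply congrArg List.sum
  apply List.map_congr_left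
  intro g hg
  rw [List.mem_range] at hg
  simp only [Function.comp_def, zero_add]
  have h3 : 3 * g + 3 ≤ (PySem.Str.splitlines raw_input).length := by omega
  exact aBody_eq_aVal (PySem.Str.splitlines raw_input) g h3

-- ===== VERDICT (by name: the statement is the Claim_ definition above) =====
theorem pt2_spec : Claim_equal_pt2 := by
  intro raw_input _ hpre
  unfold Spec_pt2
  exact pt2_eq_alt raw_input hpre
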